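-- pv_equiv track=rewrite | github.com/jatinsuteri/codeforces_sols | contest_cardgame.py | solve
-- ===== SOURCE A (Python) =====
-- def solve(a1,a2,b1,b2):
--     pairings = [
--         [(a1, b1), (a2, b2)],
--         [(a1, b2), (a2, b1)],
--         [(a2, b1), (a1, b2)],
--         [(a2, b2), (a1, b1)]
--     ]
--
--     suneet_wins = 0
--
--     for pairing in pairings:
--         sunnetwin = 0
--         slavwin = 0
--
--         for (a, b) in pairing:
--             if a > b:
--                 sunnetwin += 1
--             elif a < b:
--                 slavwin += 1
--
--         if sunnetwin > slavwin:
--             suneet_wins += 1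
--
--     return suneet_wins
-- ===== SOURCE B (Python) =====
-- def solve(a1, a2, b1, b2):
--     # Closed form, no loops or round-win counters: Suneet wins a game exactly
--     # when he dominates it componentwise (each of his cards >= its opponent)
--     # AND his card total strictly exceeds Slavic's (rules out the all-tie game).
--     # Each of the two distinct games appears twice among the four orderings.
--     bigger_total = a1 + a2 > b1 + b2
--     return 2 * bigger_total * ((a1 >= b1 and a2 >= b2) + (a1 >= b2 and a2 >= b1))
-- ===== Notes on version B (the rewrite author's own statement) =====
-- stated objective: simpler
-- what changed: Replaces the loop over four pairings with per-round win/loss counters by a loop-free closed form: a game is won iff Suneet dominates it componentwise (no round lost) and his card total strictly exceeds Slavic's, and each distinct game counts twice.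
import Mathlib
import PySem

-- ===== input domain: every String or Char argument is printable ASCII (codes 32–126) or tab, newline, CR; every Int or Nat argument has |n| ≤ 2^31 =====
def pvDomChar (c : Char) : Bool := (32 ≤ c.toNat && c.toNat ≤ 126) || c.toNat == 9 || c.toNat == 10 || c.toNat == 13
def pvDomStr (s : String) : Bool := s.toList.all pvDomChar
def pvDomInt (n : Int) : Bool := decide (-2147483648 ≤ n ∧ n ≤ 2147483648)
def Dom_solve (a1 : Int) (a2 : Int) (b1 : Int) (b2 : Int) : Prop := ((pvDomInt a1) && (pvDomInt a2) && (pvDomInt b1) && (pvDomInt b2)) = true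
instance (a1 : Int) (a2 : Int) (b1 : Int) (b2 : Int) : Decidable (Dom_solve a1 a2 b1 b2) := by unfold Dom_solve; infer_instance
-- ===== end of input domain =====

-- B: loop-free closed form — a game is won iff Suneet dominates it componentwise and has the strictly larger card total; simpler, same values.


-- ===== PORT A =====
-- the inner `for (a, b) in pairing` loop of A, as a fold over the same (sunnetwin, slavwin) state
def roundFold (pairing : List (Int × Int)) : Int × Int :=
  pairing.foldl (fun (st : Int × Int) ab =>
    if ab.1 > ab.2 then (st.1 + 1, st.2)
    else if ab.1 < ab.2 then (st.1, st.2 + 1)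
    else st) (0, 0)

def solve (a1 : Int) (a2 : Int) (b1 : Int) (b2 : Int) : Int :=
  let pairings : List (List (Int × Int)) :=
    [[(a1, b1), (a2, b2)],
     [(a1, b2), (a2, b1)],
     [(a2, b1), (a1, b2)],
     [(a2, b2), (a1, b1)]]
  pairings.foldl (fun (suneet_wins : Int) (pairing : List (Int × Int)) =>
    if (roundFold pairing).1 > (roundFold pairing).2 then suneet_wins + 1 else suneet_wins) 0

-- ===== PORT B =====
def solve_alt (a1 : Int) (a2 : Int) (b1 : Int) (b2 : Int) : Int :=
  let biggerTotal : Int := if a1 + a2 > b1 + b2 then 1 else 0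
  2 * biggerTotal *
    ((if a1 ≥ b1 ∧ a2 ≥ b2 then 1 else 0) + (if a1 ≥ b2 ∧ a2 ≥ b1 then 1 else 0))

-- ===== PRECONDITION & SPEC =====
def Spec_solve (a1 : Int) (a2 : Int) (b1 : Int) (b2 : Int) (out : Int) : Prop := out = solve_alt a1 a2 b1 b2
instance (a1 : Int) (a2 : Int) (b1 : Int) (b2 : Int) (out : Int) : Decidable (Spec_solve a1 a2 b1 b2 out) := by unfold Spec_solve; infer_instance

-- ===== CLAIM =====
def Claim_equal_solve : Prop := ∀ (a1 : Int) (a2 : Int) (b1 : Int) (b2 : Int), Dom_solve a1 a2 b1 b2 → Spec_solve a1 a2 b1 b2 (solve a1 a2 b1 b2)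

-- ===== LEMMAS AND PROOFS =====
-- A's inner loop over one game's two rounds yields exactly the two win counters.
theorem rfPair (x y u v : Int) : roundFold [(x,y),(u,v)]
    = ((if x > y then 1 else 0) + (if u > v then 1 else 0),
       (if x < y then 1 else 0) + (if u < v then 1 else 0)) := by
  simp only [roundFold, List.foldl]
  by_cases h1 : x > y <;> by_cases h2 : x < y <;> by_cases h3 : u > v <;> by_cases h4 : u < v <;>
    simp only [h1, h2, h3, h4, if_true, if_false, Prod.mk.injEq, and_true, true_and] <;> omega

-- strict round-majority ⟺ componentwise dominance plus strictly larger total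
theorem majIff (x y u v : Int) :
    ((if x > y then (1:Int) else 0) + (if u > v then 1 else 0)
      > (if x < y then (1:Int) else 0) + (if u < v then 1 else 0))
    ↔ (x ≥ y ∧ u ≥ v ∧ x + u > y + v) := by
  by_cases h1 : x > y <;> by_cases h2 : x < y <;> by_cases h3 : u > v <;> by_cases h4 : u < v <;>
    simp only [h1, h2, h3, h4, if_true, if_false] <;> omega

-- ===== VERDICT =====
set_option maxHeartbeats 1600000 in
theorem solve_spec : Claim_equal_solve := by
  intro a1 a2 b1 b2 _
  unfold Spec_solve
  simp only [solve, solve_alt, List.foldl, rfPair, majIff]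
  by_cases g1 : a1 ≥ b1 ∧ a2 ≥ b2 <;> by_cases g2 : a1 ≥ b2 ∧ a2 ≥ b1 <;>
  by_cases gs : a1 + a2 > b1 + b2 <;>
    simp only [g1, g2, gs, if_true, if_false, and_true, true_and] <;> omega
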